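-- pv_equiv track=rewrite | github.com/saumya-singh/CodeLab | HackerRank/Bit_Manipulation/Sum_vs_XOR.py | solve
-- ===== SOURCE A (Python) =====
-- def solve(n):
--     i = 0
--     count = 0
--     while 2**i < n:
--         i += 1
--
--     power = i - 1
--
--     for i in range(power + 1):
--         if n & (1 << i) == 0:
--             count += 1
--
--     return 2**count
-- ===== SOURCE B (Python) =====
-- def solve(n):
--     m = n
--     count = 0
--     while m > 1:
--         if m & 1 == 0:
--             count += 1
--         m >>= 1
--     return 2 ** count
-- ===== Notes on version B (the rewrite author's own statement) =====
-- stated objective: simpler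
-- what changed: Replaces A's two passes (a power-finding loop computing 2**i each step, then an indexed scan of bits 0..power with 1<<i masks) by a single right-shift loop that counts the zero bits of n below its most significant bit.
import Mathlib
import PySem

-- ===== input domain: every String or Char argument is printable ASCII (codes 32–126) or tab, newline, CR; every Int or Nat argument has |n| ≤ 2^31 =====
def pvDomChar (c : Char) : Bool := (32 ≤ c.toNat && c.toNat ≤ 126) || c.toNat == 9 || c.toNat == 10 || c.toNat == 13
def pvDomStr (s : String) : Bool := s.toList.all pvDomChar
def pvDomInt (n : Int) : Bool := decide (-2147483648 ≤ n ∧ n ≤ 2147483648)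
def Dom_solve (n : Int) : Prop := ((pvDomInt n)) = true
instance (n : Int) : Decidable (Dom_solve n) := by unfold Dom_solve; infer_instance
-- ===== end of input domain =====

-- B replaces A's two passes (find the power, then scan bits 0..power) by one
-- right-shift loop counting zero bits; objective: simpler.

-- ===== PORT A =====
-- while 2**i < n: i += 1   (terminates because 2^i grows past n)
def solveFind (n : Int) (i : Nat) : Nat :=
  if h : (2 : Int) ^ i < n then solveFind n (i + 1) else i
  termination_by n.toNat - 2 ^ i
  decreasing_by
    have h1 : (2 ^ i : Nat) < n.toNat := by
      have hc : ((2 ^ i : Nat) : Int) = (2 : Int) ^ i := by push_cast; ring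
      omega
    have h2 : (2 ^ i : Nat) < 2 ^ (i + 1) :=
      Nat.pow_lt_pow_right (by norm_num) (Nat.lt_succ_self i)
    omega

def solve (n : Int) : Int :=
  -- i = 0; while 2**i < n: i += 1; power = i - 1
  let power : Int := (solveFind n 0 : Int) - 1
  -- for i in range(power + 1): if n & (1 << i) == 0: count += 1
  -- (1 << i) ported as 1 <<< i.toNat: exact, since pyRange 0 _ 1 yields i ≥ 0
  let count : Int := (PySem.List.pyRange 0 (power + 1) 1).foldl
    (fun c j => if PySem.Int.band n (1 <<< j.toNat) = 0 then c + 1 else c) 0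
  -- 2**count: count ≥ 0 here, ported via toNat
  2 ^ count.toNat

-- ===== PORT B =====
-- m = n; while m > 1: if m & 1 == 0: count += 1; m >>= 1
def altLoop (m : Int) (count : Int) : Int :=
  if h : m > 1 then
    altLoop (m >>> (1 : Nat)) (if PySem.Int.band m 1 = 0 then count + 1 else count)
  else count
  termination_by m.toNat
  decreasing_by
    have hdiv : m >>> (1 : Nat) = m / 2 := by rw [Int.shiftRight_eq_div_pow]; norm_num
    rw [hdiv]; omega

def solve_alt (n : Int) : Int :=
  -- 2**count: count ≥ 0 here, ported via toNat
  2 ^ (altLoop n 0).toNat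

-- ===== PRECONDITION & SPEC =====
def Spec_solve (n : Int) (out : Int) : Prop := out = solve_alt n
instance (n : Int) (out : Int) : Decidable (Spec_solve n out) := by unfold Spec_solve; infer_instance

-- ===== CLAIM (what is proved, stated in full; the proofs are below) =====
def Claim_equal_solve : Prop := ∀ (n : Int), Dom_solve n → Spec_solve n (solve n)

-- ===== LEMMAS AND PROOFS =====

-- zero bits of a among indices 0..k-1, counted from the top index
def zTop (a : Nat) : Nat → Nat
  | 0 => 0
  | k + 1 => zTop a k + (if a / 2 ^ k % 2 = 0 then 1 else 0)

-- zero bits of a below its most significant bit, by halving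
def zLow (a : Nat) : Nat :=
  if a ≤ 1 then 0 else (if a % 2 = 0 then 1 else 0) + zLow (a / 2)
  termination_by a
  decreasing_by exact Nat.div_lt_self (by omega) (by omega)

theorem zLow_of_le_one (a : Nat) (h : a ≤ 1) : zLow a = 0 := by
  rw [zLow, if_pos h]

theorem zLow_of_ge_two (a : Nat) (h : 2 ≤ a) :
    zLow a = (if a % 2 = 0 then 1 else 0) + zLow (a / 2) := by
  rw [zLow, if_neg (by omega)]

theorem zTop_succ_shift (k a : Nat) :
    zTop a (k + 1) = (if a % 2 = 0 then 1 else 0) + zTop (a / 2) k := by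
  induction k generalizing a with
  | zero => simp [zTop]
  | succ k ih =>
    have hdiv : a / 2 ^ (k + 1) = (a / 2) / 2 ^ k := by
      rw [pow_succ, Nat.mul_comm, Nat.div_div_eq_div_mul]
    calc zTop a (k + 2) = zTop a (k + 1) + (if a / 2 ^ (k + 1) % 2 = 0 then 1 else 0) := rfl
      _ = ((if a % 2 = 0 then 1 else 0) + zTop (a / 2) k)
            + (if (a / 2) / 2 ^ k % 2 = 0 then 1 else 0) := by rw [ih, hdiv]
      _ = (if a % 2 = 0 then 1 else 0) + zTop (a / 2) (k + 1) := by
            simp [zTop]; omega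

theorem zTop_eq_zLow (a : Nat) : ∀ k, 2 ≤ a → 2 ^ (k - 1) ≤ a → a ≤ 2 ^ k → zTop a k = zLow a := by
  induction a using Nat.strong_induction_on with
  | _ a ih =>
    intro k ha hlo hhi
    match k with
    | 0 => simp at hhi; omega
    | k + 1 =>
      have hlo' : 2 ^ k ≤ a := by simpa using hlo
      rw [zTop_succ_shift, zLow_of_ge_two a ha]
      congr 1
      by_cases hsmall : a / 2 ≤ 1
      · -- a = 2 or 3, so a / 2 = 1 and k ≤ 1
        have hk1 : k ≤ 1 := by
          by_contra hk
          have : 2 ^ 2 ≤ 2 ^ k := Nat.pow_le_pow_right (by omega) (by omega)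
          omega
        have hd1 : a / 2 = 1 := by omega
        interval_cases k
        · simp [zTop, zLow_of_le_one, hd1]
        · simp [zTop, zLow_of_le_one, hd1]
      · -- a / 2 ≥ 2: apply the induction hypothesis
        have hk1 : 1 ≤ k := by
          by_contra hk
          have : k = 0 := by omega
          subst this; simp at hhi; omega
        apply ih (a / 2) (by omega) k (by omega)
        · -- 2 ^ (k - 1) ≤ a / 2
          have h2 : 2 ^ (k - 1) * 2 = 2 ^ k := by
            rw [← pow_succ]; congr 1; omega
          omega
        · -- a / 2 ≤ 2 ^ k
          omega

-- characterisation of A's power-finding loop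
theorem solveFind_spec (n : Int) (i : Nat) :
    n ≤ 2 ^ (solveFind n i) ∧ ∀ j, j < solveFind n i → i ≤ j → (2 : Int) ^ j < n := by
  induction i using solveFind.induct (n := n) with
  | case1 i h ih =>
    rw [solveFind.eq_def, dif_pos h]
    refine ⟨ih.1, fun j hj hij => ?_⟩
    rcases Nat.eq_or_lt_of_le hij with rfl | hlt
    · exact h
    · exact ih.2 j hj hlt
  | case2 i h =>
    rw [solveFind.eq_def, dif_neg h]
    exact ⟨by omega, fun j hj hij => by omega⟩

-- A's band test is a bit test
theorem band_two_pow_eq_zero_iff (a k : Nat) :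
    PySem.Int.band (a : Int) ((1 <<< k : Nat) : Int) = 0 ↔ a / 2 ^ k % 2 = 0 := by
  have h1 : (1 <<< k : Nat) = 2 ^ k := by simp [Nat.shiftLeft_eq]
  rw [h1, PySem.Int.band_natCast, Nat.and_two_pow]
  cases hb : a.testBit k
  · simp only [Nat.testBit_eq_decide_div_mod_eq, decide_eq_false_iff_not] at hb
    simp
    omega
  · simp only [Nat.testBit_eq_decide_div_mod_eq, decide_eq_true_eq] at hb
    simp [hb]

theorem foldA_eq_zTop (a : Nat) (P : Nat) (c : Int) :
    (PySem.List.pyRange 0 (P : Int) 1).foldl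
      (fun c j => if PySem.Int.band (a : Int) (1 <<< j.toNat) = 0 then c + 1 else c) c
    = c + (zTop a P : Int) := by
  induction P generalizing c with
  | zero => simp [zTop]
  | succ P ih =>
    have hsplit : PySem.List.pyRange 0 ((P : Int) + 1) 1
        = PySem.List.pyRange 0 (P : Int) 1 ++ [(P : Int)] :=
      PySem.List.pyRange_one_succ_right (by positivity)
    rw [show ((P + 1 : Nat) : Int) = (P : Int) + 1 by push_cast; ring, hsplit,
        List.foldl_append, ih]
    simp only [List.foldl_cons, List.foldl_nil, Int.toNat_natCast]
    rw [zTop]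
    by_cases hbit : a / 2 ^ P % 2 = 0
    · rw [if_pos ((band_two_pow_eq_zero_iff a P).2 hbit), if_pos hbit]
      push_cast; ring
    · rw [if_neg (fun hc => hbit ((band_two_pow_eq_zero_iff a P).1 hc)), if_neg hbit]
      push_cast; ring

-- B's loop computes zLow
theorem altLoop_eq_zLow (m : Int) (c : Int) (hm : 0 ≤ m) :
    altLoop m c = c + (zLow m.toNat : Int) := by
  induction m, c using altLoop.induct with
  | case1 m c h ih =>
    have hdiv : m >>> (1 : Nat) = m / 2 := by rw [Int.shiftRight_eq_div_pow]; norm_num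
    have hband : PySem.Int.band m 1 = m % 2 := by
      rw [PySem.Int.band_one, PySem.Int.mod_eq_emod_of_pos (by omega)]
    have htn : (m >>> (1 : Nat)).toNat = m.toNat / 2 := by rw [hdiv]; omega
    have hm2 : m % 2 = 0 ↔ m.toNat % 2 = 0 := by omega
    simp only [dite_eq_ite] at ih
    rw [altLoop, dif_pos h]
    rw [ih (by rw [hdiv]; omega), htn, zLow_of_ge_two m.toNat (by omega), hband]
    by_cases he : m % 2 = 0
    · rw [if_pos he, if_pos (hm2.1 he)]; push_cast; ring
    · rw [if_neg he, if_neg (fun hc => he (hm2.2 hc))]; push_cast; ring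
  | case2 m c h =>
    rw [altLoop.eq_def, dif_neg h]
    rw [zLow_of_le_one m.toNat (by omega)]; simp

-- ===== VERDICT (by name: the statement is the Claim_ definition above) =====
theorem solve_spec : Claim_equal_solve := by
  unfold Claim_equal_solve Spec_solve
  intro n _
  by_cases hn : n ≤ 1
  · -- both loops do nothing; both return 2^0 = 1
    have hA : solveFind n 0 = 0 := by rw [solveFind.eq_def, dif_neg (by norm_num; omega)]
    have hB : altLoop n 0 = 0 := by rw [altLoop.eq_def, dif_neg (by omega)]
    simp [solve, solve_alt, hA, hB]
  · rw [not_le] at hn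
    set P := solveFind n 0 with hP
    obtain ⟨hupper, hlower⟩ := solveFind_spec n 0
    have hP1 : 1 ≤ P := by
      by_contra hc
      have : P = 0 := by omega
      rw [← hP, this] at hupper; simp at hupper; omega
    have hlow : (2 : Int) ^ (P - 1) < n := hlower (P - 1) (by omega) (by omega)
    set a := n.toNat with hA
    have hna : n = (a : Int) := by omega
    have hloN : 2 ^ (P - 1) ≤ a := by
      have : ((2 ^ (P - 1) : Nat) : Int) < n := by push_cast; exact hlow
      omega
    have hhiN : a ≤ 2 ^ P := by
      have : n ≤ ((2 ^ P : Nat) : Int) := by push_cast; exact hupper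
      omega
    have hzz : zTop a P = zLow a := zTop_eq_zLow a P (by omega) hloN hhiN
    have hcountA : solve n = 2 ^ (zTop a P) := by
      rw [solve]
      rw [show (solveFind n 0 : Int) - 1 + 1 = (P : Int) by rw [← hP]; ring]
      rw [hna, foldA_eq_zTop a P 0]
      simp
    have hcountB : solve_alt n = 2 ^ (zLow a) := by
      rw [solve_alt, altLoop_eq_zLow n 0 (by omega)]
      simp
      rfl
    rw [hcountA, hcountB, hzz]
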